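-- pv_equiv track=rewrite | github.com/IterUp/advent-of-code | 2023/day14/main.py | process
-- ===== SOURCE A (Python) =====
-- def process(line):
--     total = 0
--     v = len(line)
--     for i, c in enumerate(line):
--         if c == 'O':
--             total += v
--             v -= 1
--         elif c == '#':
--             v = len(line) - i - 1
--     return total
-- ===== SOURCE B (Python) =====
-- def process(line):
--     n = len(line)
--     total = 0
--     pos = 0
--     for seg in line.split('#'):
--         c = seg.count('O')
--         total += c * (n - pos) - c * (c - 1) // 2
--         pos += len(seg) + 1
--     return total
-- ===== Notes on version B (the rewrite author's own statement) =====
-- stated objective: faster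
-- what changed: Replaces the per-character running-weight accumulator with a split of the line at wall characters: each wall-free segment's load is computed in one step by the closed-form arithmetic-series formula c*(n-pos) - c*(c-1)//2 from its start offset and its count of rocks.
import Mathlib
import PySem

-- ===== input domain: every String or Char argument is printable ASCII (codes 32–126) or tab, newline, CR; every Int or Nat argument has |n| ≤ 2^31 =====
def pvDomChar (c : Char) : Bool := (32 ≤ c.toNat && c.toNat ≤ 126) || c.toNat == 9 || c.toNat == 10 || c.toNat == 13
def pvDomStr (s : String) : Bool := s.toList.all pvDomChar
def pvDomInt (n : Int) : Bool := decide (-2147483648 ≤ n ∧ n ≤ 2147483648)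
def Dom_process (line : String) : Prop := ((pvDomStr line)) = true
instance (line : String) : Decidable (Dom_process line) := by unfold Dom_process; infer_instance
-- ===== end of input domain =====

-- B replaces A's per-character running-weight accumulator by a split on '#' walls with a
-- closed-form arithmetic-series sum per segment (objective: constant-factor speedup measured).

-- ===== PORT A =====
-- loop body of A's for-loop (state = (total, v), element = (i, c) from enumerate)
def processStep (n : Int) (s : Int × Int) (ic : Int × Char) : Int × Int :=
  if ic.2 = 'O' then (s.1 + s.2, s.2 - 1)
  else if ic.2 = '#' then (s.1, n - ic.1 - 1)
  else s

def process (line : String) : Int :=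
  let n : Int := PySem.Str.len line
  ((PySem.List.enumerate line.toList).foldl (processStep n) (0, n)).1

-- ===== PORT B =====
-- loop body of B's for-loop over line.split('#') (state = (total, pos))
def processAltStep (n : Int) (s : Int × Int) (seg : List Char) : Int × Int :=
  let c : Int := (PySem.Chars.count seg ['O'] : Int)
  (s.1 + (c * (n - s.2) - PySem.Int.floordiv (c * (c - 1)) 2), s.2 + PySem.Chars.len seg + 1)

def process_alt (line : String) : Int :=
  let n : Int := PySem.Str.len line
  ((PySem.Chars.splitOn line.toList ['#']).foldl (processAltStep n) (0, 0)).1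

-- ===== PRECONDITION & SPEC =====
def Spec_process (line : String) (out : Int) : Prop := out = process_alt line
instance (line : String) (out : Int) : Decidable (Spec_process line out) := by unfold Spec_process; infer_instance

-- ===== CLAIM (what is proved, stated in full; the proofs are below) =====
def Claim_equal_process : Prop := ∀ (line : String), Dom_process line → Spec_process line (process line)

-- ===== LEMMAS AND PROOFS =====

-- proof-side model of splitting at '#' (pre = accumulated current piece)
def spSeg : List Char → List Char → List (List Char)
  | pre, [] => [pre]
  | pre, c :: rest => if c = '#' then pre :: spSeg [] rest else spSeg (pre ++ [c]) rest

-- proof-side model of A's loop: total added by the remaining chars, given current weight v and index i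
def gA (n : Int) : List Char → Int → Int → Int
  | [], _, _ => 0
  | c :: cs, v, i =>
    if c = 'O' then v + gA n cs (v - 1) (i + 1)
    else if c = '#' then gA n cs (n - i - 1) (i + 1)
    else gA n cs v (i + 1)

lemma count_go_singleton (x : Char) :
    ∀ (fuel : Nat) (l : List Char) (acc : Nat), l.length ≤ fuel →
      PySem.Chars.count.go [x] fuel l acc = acc + l.count x := by
  intro fuel
  induction fuel with
  | zero => intro l acc h; simp at h; subst h; simp [PySem.Chars.count.go]
  | succ f ih =>
    intro l acc h
    cases l with
    | nil => simp [PySem.Chars.count.go]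
    | cons c rest =>
      have hr : rest.length ≤ f := by simp only [List.length_cons] at h; omega
      simp only [PySem.Chars.count.go, List.isPrefixOf]
      by_cases hx : x == c
      · simp [hx, ih rest _ hr, (beq_iff_eq.mp hx).symm]
        omega
      · have hcx : ¬ c = x := fun he => hx (by simp [he])
        simp [hx, ih rest _ hr, List.count_cons, hcx]

lemma count_singleton (x : Char) (l : List Char) :
    PySem.Chars.count l [x] = l.count x := by
  simp [PySem.Chars.count, count_go_singleton x l.length l 0 le_rfl]

lemma splitOn_go_eq :
    ∀ (fuel : Nat) (cs cur : List Char) (acc : List (List Char)), cs.length < fuel →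
      PySem.Chars.splitOn.go ['#'] fuel cs cur acc = acc.reverse ++ spSeg cur.reverse cs := by
  intro fuel
  induction fuel with
  | zero => omega
  | succ f ih =>
    intro cs cur acc h
    cases cs with
    | nil => simp [PySem.Chars.splitOn.go, spSeg]
    | cons c rest =>
      have hr : rest.length < f := by simp only [List.length_cons] at h; omega
      simp only [PySem.Chars.splitOn.go, List.isPrefixOf]
      by_cases hc : c = '#'
      · simp [hc, ih rest _ _ hr, spSeg]
      · have hcb : ('#' == c) = false := by simpa using (Ne.symm hc)
        simp only [hcb]
        simp only [Bool.false_and]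
        rw [if_neg (by simp)]
        rw [ih rest _ _ hr]
        simp [spSeg, hc]

lemma splitOn_eq (cs : List Char) : PySem.Chars.splitOn cs ['#'] = spSeg [] cs := by
  have := splitOn_go_eq (cs.length + 1) cs [] [] (by omega)
  simpa [PySem.Chars.splitOn] using this

lemma foldA_fst (n : Int) :
    ∀ (cs : List Char) (s t v : Int),
      ((PySem.List.enumerate cs s).foldl (processStep n) (t, v)).1 = t + gA n cs v s := by
  intro cs
  induction cs with
  | nil => intro s t v; simp [PySem.List.enumerate_nil, gA]
  | cons c rest ih =>
    intro s t v
    rw [PySem.List.enumerate_cons]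
    by_cases h1 : c = 'O'
    · simp [List.foldl_cons, processStep, h1, gA, ih]; ring
    · by_cases h2 : c = '#'
      · simp [List.foldl_cons, processStep, h1, h2, gA, ih]
      · simp [List.foldl_cons, processStep, h1, h2, gA, ih]

lemma spSeg_no (cs : List Char) (h : '#' ∉ cs) : ∀ pre, spSeg pre cs = [pre ++ cs] := by
  induction cs with
  | nil => intro pre; simp [spSeg]
  | cons c rest ih =>
    intro pre
    have hc : ¬ c = '#' := fun he => h (by simp [he])
    have hr : '#' ∉ rest := fun he => h (by simp [he])
    simp [spSeg, hc, ih hr]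

lemma spSeg_hash (seg : List Char) (h : '#' ∉ seg) :
    ∀ (pre rest : List Char), spSeg pre (seg ++ '#' :: rest) = (pre ++ seg) :: spSeg [] rest := by
  induction seg with
  | nil => intro pre rest; simp [spSeg]
  | cons c s ih =>
    intro pre rest
    have hc : ¬ c = '#' := fun he => h (by simp [he])
    have hs : '#' ∉ s := fun he => h (by simp [he])
    simp [spSeg, hc, ih hs]

lemma foldB_add (n : Int) :
    ∀ (segs : List (List Char)) (t p : Int),
      (segs.foldl (processAltStep n) (t, p)).1 = t + (segs.foldl (processAltStep n) (0, p)).1 := by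
  intro segs
  induction segs with
  | nil => intro t p; simp
  | cons seg rest ih =>
    intro t p
    simp only [List.foldl_cons, processAltStep]
    rw [ih, ih (0 + _)]
    ring

lemma fd_eq (k : Nat) :
    PySem.Int.floordiv ((k : Int) * ((k : Int) - 1)) 2 = ((k * (k - 1) / 2 : Nat) : Int) := by
  cases k with
  | zero => simp [PySem.Int.floordiv]
  | succ m =>
    have h1 : ((m + 1 : Nat) : Int) * (((m + 1 : Nat) : Int) - 1) = (((m + 1) * m : Nat) : Int) := by
      push_cast; ring
    rw [h1]
    have h2 : (2 : Int) = ((2 : Nat) : Int) := rfl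
    rw [h2, PySem.Int.floordiv_natCast]
    norm_num

lemma tri_succ (c : Nat) : (c + 1) * c / 2 = c + c * (c - 1) / 2 := by
  cases c with
  | zero => rfl
  | succ m =>
    obtain ⟨k, hk⟩ := Nat.even_mul_succ_self m
    have h1 : (m + 1 + 1) * (m + 1) = m * (m + 1) + 2 * (m + 1) := by ring
    have h2 : (m + 1) * (m + 1 - 1) = m * (m + 1) := by rw [Nat.add_sub_cancel]; ring
    omega

lemma gA_free (n : Int) :
    ∀ (seg : List Char), '#' ∉ seg → ∀ (rest : List Char) (v i : Int),
      gA n (seg ++ rest) v i =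
        (seg.count 'O' : Int) * v - ((seg.count 'O' * (seg.count 'O' - 1) / 2 : Nat) : Int)
          + gA n rest (v - seg.count 'O') (i + seg.length) := by
  intro seg
  induction seg with
  | nil => intro h rest v i; simp [gA]
  | cons c s ih =>
    intro h rest v i
    have hc : ¬ c = '#' := fun he => h (by simp [he])
    have hs : '#' ∉ s := fun he => h (by simp [he])
    by_cases hO : c = 'O'
    · simp only [List.cons_append, gA, if_pos hO, hO, List.count_cons, List.length_cons]
      rw [ih hs]
      have hb : ('O' == 'O') = true := by decide
      simp only [hb, if_true]
      have e1 : (s.count 'O' + 1) * (s.count 'O' + 1 - 1) / 2 = s.count 'O' + s.count 'O' * (s.count 'O' - 1) / 2 := by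
        simpa using tri_succ (s.count 'O')
      rw [e1]
      push_cast
      ring_nf
    · have hb : (c == 'O') = false := by simpa using hO
      simp only [List.cons_append, gA, if_neg hO, if_neg hc, List.count_cons,
        List.length_cons, hb, Bool.false_eq_true, if_false, Nat.add_zero]
      rw [ih hs]
      push_cast
      ring_nf

lemma split_cases (cs : List Char) :
    ('#' ∉ cs) ∨ ∃ seg rest, cs = seg ++ '#' :: rest ∧ '#' ∉ seg := by
  induction cs with
  | nil => left; simp
  | cons c rest ih =>
    by_cases hc : c = '#'
    · right; exact ⟨[], rest, by simp [hc], by simp⟩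
    · rcases ih with h | ⟨seg, r, he, hn⟩
      · left
        intro hm
        rcases List.mem_cons.mp hm with h1 | h1
        · exact hc h1.symm
        · exact h h1
      · right
        refine ⟨c :: seg, r, by simp [he], ?_⟩
        intro hm
        rcases List.mem_cons.mp hm with h1 | h1
        · exact hc h1.symm
        · exact hn h1

lemma main_lemma (n : Int) :
    ∀ (N : Nat) (cs : List Char), cs.length ≤ N → ∀ (i : Int),
      gA n cs (n - i) i = ((spSeg [] cs).foldl (processAltStep n) (0, i)).1 := by
  intro N
  induction N with
  | zero =>
    intro cs h i
    have : cs = [] := by simpa using h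
    subst this
    simp [gA, spSeg, processAltStep, PySem.Chars.count, PySem.Chars.count.go, PySem.Int.floordiv]
  | succ N ih =>
    intro cs h i
    rcases split_cases cs with hno | ⟨seg, rest, he, hn⟩
    · rw [spSeg_no cs hno []]
      have := gA_free n cs hno [] (n - i) i
      simp only [List.append_nil] at this
      rw [this]
      simp only [List.foldl_cons, List.foldl_nil, processAltStep, count_singleton, fd_eq]
      simp [gA]
    · subst he
      have hrest : rest.length ≤ N := by
        simp only [List.length_append, List.length_cons] at h; omega
      have hgs : gA n ('#' :: rest) (n - i - (seg.count 'O' : Int)) (i + seg.length)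
          = gA n rest (n - (i + seg.length + 1)) (i + seg.length + 1) := by
        have : n - (i + (seg.length : Int)) - 1 = n - (i + seg.length + 1) := by ring
        simp [gA, this]
      rw [gA_free n seg hn _ (n - i) i]
      rw [show (n - i - (seg.count 'O' : Int)) = (n - i - (seg.count 'O' : Int)) from rfl]
      rw [hgs, ih rest hrest (i + seg.length + 1)]
      rw [spSeg_hash seg hn []]
      simp only [List.foldl_cons, processAltStep, count_singleton, fd_eq,
        PySem.Chars.len_eq, List.nil_append]
      conv_rhs => rw [foldB_add n (spSeg [] rest)]
      have hpos : (0 : Int) + (seg.length : Int) + 1 = (seg.length : Int) + 1 := by ring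
      ring_nf

-- ===== VERDICT (by name: the statement is the Claim_ definition above) =====
theorem process_spec : Claim_equal_process := by
  intro line _
  unfold Spec_process process process_alt
  rw [foldA_fst, splitOn_eq]
  have h := main_lemma (PySem.Str.len line) (line.toList.length) line.toList le_rfl 0
  simpa using h
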